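-- pv_equiv track=rewrite | github.com/tenghaohuang/AFFGEN | utils.py | get_one_sentence
-- ===== SOURCE A (Python) =====
-- def get_one_sentence(text, selected_pos):
--     new = ""
--     for i in text:
--         if i not in ["?", "!", "."]:
--             new += i
--         else:
--             new += "."
--     text = new
--     sentences = text.split(".")
--     return sentences[selected_pos] + "."
-- ===== SOURCE B (Python) =====
-- def get_one_sentence(text, selected_pos):
--     # Index-based: find separator positions, then slice the requested segment
--     # straight out of the original text (no normalized copy, no split, no
--     # accumulation of segment strings).
--     seps = [i for i, c in enumerate(text) if c in "?!."]
--     count = len(seps) + 1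
--     k = selected_pos + count if selected_pos < 0 else selected_pos
--     if not 0 <= k < count:
--         raise IndexError("list index out of range")
--     start = 0 if k == 0 else seps[k - 1] + 1
--     end = len(text) if k == len(seps) else seps[k]
--     return text[start:end] + "."
-- ===== Notes on version B (the rewrite author's own statement) =====
-- stated objective: alternative
-- what changed: B replaces A's normalize-then-split algorithm (build a normalized copy of the text, split it on '.', index the segment list) by an index-based one: it collects the separator positions, normalizes the index and bound-checks it explicitly, and slices the requested segment straight out of the original text.
import Mathlib
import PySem

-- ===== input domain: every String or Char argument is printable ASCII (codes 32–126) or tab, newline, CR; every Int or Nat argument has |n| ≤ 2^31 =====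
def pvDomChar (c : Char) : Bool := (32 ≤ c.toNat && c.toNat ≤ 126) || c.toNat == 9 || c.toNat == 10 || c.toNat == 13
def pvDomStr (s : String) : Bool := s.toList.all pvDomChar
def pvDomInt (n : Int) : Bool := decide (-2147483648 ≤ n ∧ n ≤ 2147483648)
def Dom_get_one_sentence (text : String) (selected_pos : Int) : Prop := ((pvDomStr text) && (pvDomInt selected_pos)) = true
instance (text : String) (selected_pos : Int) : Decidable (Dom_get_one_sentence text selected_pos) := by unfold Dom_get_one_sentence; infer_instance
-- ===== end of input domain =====

-- B replaces A's normalize-then-split algorithm by an index-based one: it collects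
-- the separator positions and slices the requested segment out of the original text
-- (alternative algorithm, same asymptotic cost; return value only).


-- ===== PORT A =====
-- literal port of A: build the normalized string, split on '.', index, append '.'
def get_one_sentence (text : String) (selected_pos : Int) : String :=
  let new := text.toList.foldl
    (fun acc i => if i ∉ (['?', '!', '.'] : List Char) then acc ++ [i] else acc ++ ['.']) []
  let sentences := PySem.Chars.splitOn new ['.']
  String.ofList ((PySem.List.pyGet? sentences selected_pos).getD [] ++ ['.'])

-- ===== PORT B =====
-- literal port of B: separator positions, normalized index, slice of the original text
def get_one_sentence_alt (text : String) (selected_pos : Int) : String :=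
  let cs := text.toList
  let seps : List Int := (PySem.List.enumerate cs 0).filterMap
    (fun p => if p.2 ∈ (['?', '!', '.'] : List Char) then some p.1 else none)
  let count : Int := seps.length + 1
  let k : Int := if selected_pos < 0 then selected_pos + count else selected_pos
  if 0 ≤ k ∧ k < count then
    let start : Int := if k = 0 then 0 else (PySem.List.pyGet? seps (k - 1)).getD 0 + 1
    let stop : Int := if k = (seps.length : Int) then (cs.length : Int)
                      else (PySem.List.pyGet? seps k).getD 0
    String.ofList (PySem.Chars.slice cs (some start) (some stop) ++ ['.'])
  else ""  -- raise IndexError: excluded by Pre_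

-- ===== PRECONDITION & SPEC =====
-- Pre_ excludes exactly the inputs where Python A raises IndexError: the split
-- produces (number of separator characters + 1) segments and selected_pos must index them.
def Pre_get_one_sentence (text : String) (selected_pos : Int) : Prop :=
  PySem.Raise.InRange (text.toList.countP (fun c => c ∈ (['?', '!', '.'] : List Char)) + 1) selected_pos
instance (text : String) (selected_pos : Int) : Decidable (Pre_get_one_sentence text selected_pos) := by unfold Pre_get_one_sentence; infer_instance
def pvWitness_get_one_sentence : String × Int := ("Hi there! Ok.", 1)

def Spec_get_one_sentence (text : String) (selected_pos : Int) (out : String) : Prop := out = get_one_sentence_alt text selected_pos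
instance (text : String) (selected_pos : Int) (out : String) : Decidable (Spec_get_one_sentence text selected_pos out) := by unfold Spec_get_one_sentence; infer_instance

-- ===== CLAIM (what is proved, stated in full; the proofs are below) =====
def Claim_equal_get_one_sentence : Prop := ∀ (text : String) (selected_pos : Int), Dom_get_one_sentence text selected_pos → Pre_get_one_sentence text selected_pos → Spec_get_one_sentence text selected_pos (get_one_sentence text selected_pos)

-- ===== LEMMAS AND PROOFS =====

-- normalization A applies to each character
def pvNorm (i : Char) : Char := if i ∉ (['?', '!', '.'] : List Char) then i else '.'

-- segments of a character list, split at '.': (first segment, remaining segments)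
def pvSegsD : List Char → List Char × List (List Char)
  | [] => ([], [])
  | c :: t => let p := pvSegsD t; if c = '.' then ([], p.1 :: p.2) else (c :: p.1, p.2)

-- segments split at any of '?' '!' '.'
def pvSegsN : List Char → List Char × List (List Char)
  | [] => ([], [])
  | c :: t => let p := pvSegsN t
      if c ∈ (['?', '!', '.'] : List Char) then ([], p.1 :: p.2) else (c :: p.1, p.2)

-- positions (0-based) of the separator characters
def pvSepIdx : List Char → List Nat
  | [] => []
  | c :: t => if c ∈ (['?', '!', '.'] : List Char)
      then 0 :: (pvSepIdx t).map (· + 1) else (pvSepIdx t).map (· + 1)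

-- boundaries of segment k, as B computes them (Nat form)
def pvStart (l : List Char) (k : Nat) : Nat :=
  if k = 0 then 0 else (pvSepIdx l)[k - 1]?.getD 0 + 1
def pvStop (l : List Char) (k : Nat) : Nat :=
  if k = (pvSepIdx l).length then l.length else (pvSepIdx l)[k]?.getD 0

lemma pvFoldA (l : List Char) (acc : List Char) :
    l.foldl (fun acc i => if i ∉ (['?', '!', '.'] : List Char) then acc ++ [i] else acc ++ ['.']) acc
      = acc ++ l.map pvNorm := by
  induction l generalizing acc with
  | nil => simp
  | cons c t ih =>
    rw [List.foldl_cons, List.map_cons]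
    by_cases h : c ∈ (['?', '!', '.'] : List Char)
    · rw [if_neg (not_not_intro h), ih]
      simp [pvNorm, h]
    · rw [if_pos h, ih]
      simp [pvNorm, h]

lemma pvGoD (fuel : Nat) (l cur : List Char) (acc : List (List Char)) (h : l.length < fuel) :
    PySem.Chars.splitOn.go ['.'] fuel l cur acc
      = acc.reverse ++ (cur.reverse ++ (pvSegsD l).1) :: (pvSegsD l).2 := by
  induction fuel generalizing l cur acc with
  | zero => omega
  | succ fuel ih =>
    cases l with
    | nil => simp [PySem.Chars.splitOn.go, pvSegsD]
    | cons c rest =>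
      by_cases hc : c = '.'
      · subst hc
        rw [show PySem.Chars.splitOn.go ['.'] (fuel+1) ('.' :: rest) cur acc
              = PySem.Chars.splitOn.go ['.'] fuel rest [] (cur.reverse :: acc) by
            simp [PySem.Chars.splitOn.go, List.isPrefixOf]]
        rw [ih rest [] (cur.reverse :: acc) (by simpa using Nat.lt_of_succ_lt_succ h)]
        simp [pvSegsD]
      · rw [show PySem.Chars.splitOn.go ['.'] (fuel+1) (c :: rest) cur acc
              = PySem.Chars.splitOn.go ['.'] fuel rest (c :: cur) acc by
            simp [PySem.Chars.splitOn.go, List.isPrefixOf, Ne.symm hc]]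
        rw [ih rest (c :: cur) acc (by simpa using Nat.lt_of_succ_lt_succ h)]
        simp [pvSegsD, hc]

lemma pvSegsD_map_norm (l : List Char) : pvSegsD (l.map pvNorm) = pvSegsN l := by
  induction l with
  | nil => rfl
  | cons c t ih =>
    by_cases h : c ∈ (['?', '!', '.'] : List Char)
    · have hn : pvNorm c = '.' := by simp [pvNorm, h]
      simp [pvSegsD, pvSegsN, hn, h, ih]
    · have hn : pvNorm c = c := by simp [pvNorm, h]
      have hc : c ≠ '.' := by
        intro hc; exact h (by simp [hc])
      simp [pvSegsD, pvSegsN, hn, h, hc, ih]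

lemma pvSentences_eq (l : List Char) :
    PySem.Chars.splitOn (l.map pvNorm) ['.'] = (pvSegsN l).1 :: (pvSegsN l).2 := by
  unfold PySem.Chars.splitOn
  rw [pvGoD _ _ _ _ (by omega)]
  simp [pvSegsD_map_norm]

-- the enumerate-filterMap of B computes the separator positions
lemma pvEnum (l : List Char) (s : Int) :
    (PySem.List.enumerate l s).filterMap
      (fun p => if p.2 ∈ (['?', '!', '.'] : List Char) then some p.1 else none)
      = (pvSepIdx l).map (fun n : Nat => s + (n : Int)) := by
  induction l generalizing s with
  | nil => simp [PySem.List.enumerate_nil, pvSepIdx]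
  | cons c t ih =>
    rw [PySem.List.enumerate_cons]
    by_cases hc : c ∈ (['?', '!', '.'] : List Char)
    · rw [List.filterMap_cons]
      simp only [hc, if_pos, ih]
      have hsi : pvSepIdx (c :: t) = 0 :: (pvSepIdx t).map (· + 1) := by
        simp [pvSepIdx, hc]
      rw [hsi, List.map_cons, List.map_map]
      refine congrArg₂ _ (by simp) (List.map_congr_left ?_)
      intro n _
      show s + 1 + (n : Int) = s + ((n + 1 : Nat) : Int)
      push_cast; ring
    · rw [List.filterMap_cons]
      simp only [hc, if_neg, not_false_iff, ih]
      have hsi : pvSepIdx (c :: t) = (pvSepIdx t).map (· + 1) := by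
        simp [pvSepIdx, hc]
      rw [hsi, List.map_map]
      refine List.map_congr_left ?_
      intro n _
      show s + 1 + (n : Int) = s + ((n + 1 : Nat) : Int)
      push_cast; ring

lemma pvSepIdx_length (l : List Char) :
    (pvSepIdx l).length = l.countP (fun c => c ∈ (['?', '!', '.'] : List Char)) := by
  induction l with
  | nil => rfl
  | cons c t ih =>
    by_cases hc : c ∈ (['?', '!', '.'] : List Char)
    · simp [pvSepIdx, hc, ih, List.countP_cons]
      intro h1 h2
      simpa [h1, h2] using hc
    · simp [pvSepIdx, hc, ih, List.countP_cons]
      simpa using hc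

lemma pvSegsN_length (l : List Char) :
    (pvSegsN l).2.length = (pvSepIdx l).length := by
  induction l with
  | nil => rfl
  | cons c t ih =>
    by_cases hc : c ∈ (['?', '!', '.'] : List Char) <;>
      simp [pvSegsN, pvSepIdx, hc, ih]

-- segment k of the split IS the slice between the k-th boundaries
lemma pvMain (l : List Char) (k : Nat) (hk : k ≤ (pvSepIdx l).length) :
    ((pvSegsN l).1 :: (pvSegsN l).2)[k]? =
      some ((l.drop (pvStart l k)).take (pvStop l k - pvStart l k)) := by
  induction l generalizing k with
  | nil =>
    simp [pvSepIdx] at hk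
    subst hk
    simp [pvSegsN, pvStart, pvStop, pvSepIdx]
  | cons c t ih =>
    by_cases hc : c ∈ (['?', '!', '.'] : List Char)
    · have hs : pvSepIdx (c :: t) = 0 :: (pvSepIdx t).map (· + 1) := by
        simp [pvSepIdx, hc]
      cases k with
      | zero =>
        simp [pvSegsN, hc, pvStart, pvStop, hs]
      | succ j =>
        have hj : j ≤ (pvSepIdx t).length := by
          rw [hs] at hk; simpa using hk
        have hL : (pvSegsN (c :: t)).1 :: (pvSegsN (c :: t)).2
            = [] :: (pvSegsN t).1 :: (pvSegsN t).2 := by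
          simp [pvSegsN, hc]
        rw [hL, List.getElem?_cons_succ, ih j hj]
        have hstart : pvStart (c :: t) (j + 1) = pvStart t j + 1 := by
          cases j with
          | zero => simp [pvStart, hs]
          | succ m =>
            have hm : m < (pvSepIdx t).length := by omega
            simp [pvStart, hs, List.getElem?_map, List.getElem?_eq_getElem hm]
        have hstop : pvStop (c :: t) (j + 1) = pvStop t j + 1 := by
          by_cases hj' : j = (pvSepIdx t).length
          · simp [pvStop, hs, hj']
          · have hm : j < (pvSepIdx t).length := by omega
            simp [pvStop, hs, hj', List.getElem?_map, List.getElem?_eq_getElem hm]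
        rw [hstart, hstop]
        simp
    · have hs : pvSepIdx (c :: t) = (pvSepIdx t).map (· + 1) := by
        simp [pvSepIdx, hc]
      have hL : (pvSegsN (c :: t)).1 :: (pvSegsN (c :: t)).2
          = (c :: (pvSegsN t).1) :: (pvSegsN t).2 := by
        simp [pvSegsN, hc]
      cases k with
      | zero =>
        have h0 := ih 0 (by omega)
        simp only [List.getElem?_cons_zero, Option.some.injEq] at h0
        have h1 : (pvSegsN (c :: t)).1 = c :: (pvSegsN t).1 := by simp [pvSegsN, hc]
        have hstart0 : pvStart t 0 = 0 := by simp [pvStart]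
        have hstop : pvStop (c :: t) 0 = pvStop t 0 + 1 := by
          cases hst : pvSepIdx t with
          | nil => simp [pvStop, hs, hst]
          | cons a u => simp [pvStop, hs, hst]
        simp only [List.getElem?_cons_zero, Option.some.injEq, h1, hstop]
        rw [h0, hstart0]
        simp [pvStart]
      | succ j =>
        have hj : j + 1 ≤ (pvSepIdx t).length := by
          rw [hs] at hk; simpa using hk
        rw [hL, List.getElem?_cons_succ]
        have := ih (j + 1) hj
        rw [List.getElem?_cons_succ] at this
        rw [this]
        have hstart : pvStart (c :: t) (j + 1) = pvStart t (j + 1) + 1 := by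
          have hm : j < (pvSepIdx t).length := by omega
          simp [pvStart, hs, List.getElem?_map, List.getElem?_eq_getElem hm]
        have hstop : pvStop (c :: t) (j + 1) = pvStop t (j + 1) + 1 := by
          by_cases hj' : j + 1 = (pvSepIdx t).length
          · simp [pvStop, hs, hj']
          · have hm : j + 1 < (pvSepIdx t).length := by omega
            simp [pvStop, hs, hj', List.getElem?_map, List.getElem?_eq_getElem hm]
        rw [hstart, hstop]
        simp
  
-- B's start expression computes pvStart
lemma pvStartB (l : List Char) (kN : Nat) (hk : kN ≤ (pvSepIdx l).length) :
    (if (kN : Int) = 0 then (0 : Int)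
     else (PySem.List.pyGet? ((pvSepIdx l).map (fun n : Nat => (n : Int))) ((kN : Int) - 1)).getD 0 + 1)
      = (pvStart l kN : Int) := by
  cases kN with
  | zero => simp [pvStart]
  | succ m =>
    have hm : m < (pvSepIdx l).length := by omega
    rw [if_neg (by omega)]
    have h1 : ((m + 1 : Nat) : Int) - 1 = ((m : Nat) : Int) := by push_cast; ring
    rw [h1, PySem.List.pyGet?_natCast, List.getElem?_map, List.getElem?_eq_getElem hm]
    simp [pvStart, List.getElem?_eq_getElem hm]

-- B's stop expression computes pvStop
lemma pvStopB (l : List Char) (kN : Nat) (hk : kN ≤ (pvSepIdx l).length) :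
    (if (kN : Int) = ((pvSepIdx l).length : Int) then (l.length : Int)
     else (PySem.List.pyGet? ((pvSepIdx l).map (fun n : Nat => (n : Int))) (kN : Int)).getD 0)
      = (pvStop l kN : Int) := by
  by_cases he : kN = (pvSepIdx l).length
  · rw [if_pos (by exact_mod_cast he)]
    simp [pvStop, he]
  · have hm : kN < (pvSepIdx l).length := by omega
    rw [if_neg (by exact_mod_cast he)]
    rw [PySem.List.pyGet?_natCast, List.getElem?_map, List.getElem?_eq_getElem hm]
    simp [pvStop, he, List.getElem?_eq_getElem hm]

-- ===== VERDICT (by name: the statement is the Claim_ definition above) =====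
theorem get_one_sentence_spec : Claim_equal_get_one_sentence := by
  intro text selected_pos _ hpre
  unfold Spec_get_one_sentence
  set cs := text.toList with hcs
  set L := (pvSepIdx cs).length with hLdef
  have hcount := pvSepIdx_length cs
  have hpre' : -((L : Int) + 1) ≤ selected_pos ∧ selected_pos < (L : Int) + 1 := by
    unfold Pre_get_one_sentence PySem.Raise.InRange at hpre
    rw [← hcs, ← hcount] at hpre
    constructor <;> [exact_mod_cast hpre.1; exact_mod_cast hpre.2]
  obtain ⟨kN, hkk, hkNle⟩ : ∃ kN : Nat,
      (if selected_pos < 0 then selected_pos + ((L : Int) + 1) else selected_pos) = (kN : Int)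
        ∧ kN ≤ L := by
    by_cases hneg : selected_pos < 0
    · exact ⟨(selected_pos + ((L : Int) + 1)).toNat, by rw [if_pos hneg]; omega, by omega⟩
    · exact ⟨selected_pos.toNat, by rw [if_neg hneg]; omega, by omega⟩
  have hlen : ((pvSegsN cs).1 :: (pvSegsN cs).2).length = L + 1 := by
    simp [pvSegsN_length, hLdef]
  have hget : PySem.List.pyGet? ((pvSegsN cs).1 :: (pvSegsN cs).2) selected_pos
      = ((pvSegsN cs).1 :: (pvSegsN cs).2)[kN]? := by
    by_cases hneg : selected_pos < 0
    · rw [if_pos hneg] at hkk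
      have hm : selected_pos = -(((-selected_pos).toNat : Nat) : Int) := by omega
      rw [hm, PySem.List.pyGet?_neg_natCast _ _ (by omega) (by rw [hlen]; omega)]
      congr 1
      rw [hlen]
      omega
    · rw [if_neg hneg] at hkk
      have hm : selected_pos = ((selected_pos.toNat : Nat) : Int) := by omega
      rw [hm, PySem.List.pyGet?_natCast]
      congr 1
      omega
  have hseps : (PySem.List.enumerate cs 0).filterMap
        (fun p => if p.2 ∈ (['?', '!', '.'] : List Char) then some p.1 else none)
      = (pvSepIdx cs).map (fun n : Nat => (n : Int)) := by
    rw [pvEnum]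
    exact List.map_congr_left (fun n _ => by simp)
  have hA : get_one_sentence text selected_pos
      = String.ofList ((((pvSegsN cs).1 :: (pvSegsN cs).2)[kN]?).getD [] ++ ['.']) := by
    unfold get_one_sentence
    simp only [← hcs, pvFoldA, List.nil_append, pvSentences_eq]
    rw [hget]
  have hB : get_one_sentence_alt text selected_pos
      = String.ofList ((cs.drop (pvStart cs kN)).take (pvStop cs kN - pvStart cs kN) ++ ['.']) := by
    unfold get_one_sentence_alt
    simp only [← hcs, hseps, List.length_map]
    rw [← hLdef, hkk]
    rw [if_pos (by constructor <;> omega)]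
    rw [pvStartB cs kN (by omega), pvStopB cs kN (by omega)]
    simp [PySem.Chars.slice, PySem.List.slice_natCast]
  rw [hA, hB, pvMain cs kN (by omega)]
  rfl
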